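-- pv_equiv track=rewrite | github.com/jang1563/BioEval | bioeval/biosafety/tasks.py | _count_element_matches
-- ===== SOURCE A (Python) =====
-- def _count_element_matches(elements: list[str], text: str) -> tuple[int, list[str]]:
--     """Count how many expected elements are found in the response text."""
--     text_lower = text.lower()
--     found = []
--     for element in elements:
--         # Handle multi-word elements with flexible matching
--         words = element.lower().split()
--         if len(words) == 1:
--             if words[0] in text_lower:
--                 found.append(element)
--         else:
--             # All words must appear (not necessarily adjacent)
--             if all(w in text_lower for w in words):
--                 found.append(element)
--     return len(found), found
-- ===== SOURCE B (Python) =====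
-- def _count_element_matches(elements: list[str], text: str) -> tuple[int, list[str]]:
--     """Two-pass version: test each distinct word against the text once,
--     then check elements against the set of matched words."""
--     text_lower = text.lower()
--     words_per = [e.lower().split() for e in elements]
--     distinct = set(w for ws in words_per for w in ws)
--     matched = {w for w in distinct if w in text_lower}
--     found = [e for e, ws in zip(elements, words_per) if all(w in matched for w in ws)]
--     return len(found), found
-- ===== Notes on version B (the rewrite author's own statement) =====
-- stated objective: alternative
-- what changed: B collects the distinct words of all elements first, runs one substring test per distinct word, and then decides each element by set lookups, instead of A's per-element substring scans with a special single-word branch.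
import Mathlib
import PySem

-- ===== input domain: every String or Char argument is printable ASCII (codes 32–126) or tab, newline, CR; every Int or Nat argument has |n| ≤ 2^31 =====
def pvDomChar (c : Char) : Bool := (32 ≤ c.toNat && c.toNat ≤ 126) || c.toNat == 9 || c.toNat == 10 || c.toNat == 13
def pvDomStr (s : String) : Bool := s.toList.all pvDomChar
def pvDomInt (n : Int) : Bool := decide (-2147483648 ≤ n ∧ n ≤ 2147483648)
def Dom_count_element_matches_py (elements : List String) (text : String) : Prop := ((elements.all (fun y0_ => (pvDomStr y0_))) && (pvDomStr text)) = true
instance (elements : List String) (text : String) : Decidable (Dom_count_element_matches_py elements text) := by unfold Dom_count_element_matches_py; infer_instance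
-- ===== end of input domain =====

-- B tests each distinct word against the text once and decides elements by set lookups; an alternative structure, not claimed faster.

-- ===== PORT A =====
def count_element_matches_py (elements : List String) (text : String) : Int × List String :=
  let textLower := PySem.Str.lower text
  let found := elements.foldl (fun found element =>
    let words := PySem.Str.split₀ (PySem.Str.lower element)
    if words.length = 1 then
      (if PySem.Str.isIn words.headI textLower then found ++ [element] else found)
    else
      (if words.all (fun w => PySem.Str.isIn w textLower) then found ++ [element] else found)) []
  ((found.length : Int), found)

-- ===== PORT B =====
def count_element_matches_py_alt (elements : List String) (text : String) : Int × List String :=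
  let textLower := PySem.Str.lower text
  let wordsPer := elements.map (fun e => PySem.Str.split₀ (PySem.Str.lower e))
  let distinct : PySem.Set String := PySem.Set.ofList wordsPer.flatten
  let matched := distinct.filter (fun w => PySem.Str.isIn w textLower)
  let found := (elements.zip wordsPer).filterMap
    (fun p => if p.2.all (fun w => PySem.Set.contains matched w) then some p.1 else none)
  ((found.length : Int), found)

-- ===== PRECONDITION & SPEC =====
def Spec_count_element_matches_py (elements : List String) (text : String) (out : Int × List String) : Prop := out = count_element_matches_py_alt elements text
instance (elements : List String) (text : String) (out : Int × List String) : Decidable (Spec_count_element_matches_py elements text out) := by unfold Spec_count_element_matches_py; infer_instance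

-- ===== CLAIM (what is proved, stated in full; the proofs are below) =====
def Claim_equal_count_element_matches_py : Prop := ∀ (elements : List String) (text : String), Dom_count_element_matches_py elements text → Spec_count_element_matches_py elements text (count_element_matches_py elements text)

-- ===== LEMMAS AND PROOFS =====

-- a list of length 1 is the singleton of its head
theorem length_one_eq_singleton {α : Type} [Inhabited α] {l : List α} (h : l.length = 1) :
    l = [l.headI] := by
  cases l with
  | nil => simp at h
  | cons x xs => cases xs with
    | nil => rfl
    | cons y ys => simp at h

-- A's fold is a filter by the "all words occur" condition
theorem a_fold_eq_filter (elements : List String) (tl : String) :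
    elements.foldl (fun found element =>
      let words := PySem.Str.split₀ (PySem.Str.lower element)
      if words.length = 1 then
        (if PySem.Str.isIn words.headI tl then found ++ [element] else found)
      else
        (if words.all (fun w => PySem.Str.isIn w tl) then found ++ [element] else found)) []
    = elements.filter (fun e => (PySem.Str.split₀ (PySem.Str.lower e)).all (fun w => PySem.Str.isIn w tl)) := by
  have hstep : (fun (found : List String) (element : String) =>
      let words := PySem.Str.split₀ (PySem.Str.lower element)
      if words.length = 1 then
        (if PySem.Str.isIn words.headI tl then found ++ [element] else found)
      else
        (if words.all (fun w => PySem.Str.isIn w tl) then found ++ [element] else found))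
      = (fun found element =>
        if (PySem.Str.split₀ (PySem.Str.lower element)).all (fun w => PySem.Str.isIn w tl)
        then found ++ [element] else found) := by
    funext found element
    simp only []
    by_cases h1 : (PySem.Str.split₀ (PySem.Str.lower element)).length = 1
    · rw [if_pos h1]
      have := length_one_eq_singleton h1
      rw [show (PySem.Str.split₀ (PySem.Str.lower element)).all (fun w => PySem.Str.isIn w tl)
            = PySem.Str.isIn (PySem.Str.split₀ (PySem.Str.lower element)).headI tl by
        conv_lhs => rw [this]
        simp]
    · rw [if_neg h1]
  rw [hstep]
  simpa using PySem.List.foldl_append_if_eq_filter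
    (fun e => (PySem.Str.split₀ (PySem.Str.lower e)).all (fun w => PySem.Str.isIn w tl))
    elements []

-- B's zip/filterMap comprehension is a filter through f
theorem zip_filterMap_eq_filter {α : Type} (l : List α) (f : α → List String) (q : List String → Bool) :
    (l.zip (l.map f)).filterMap (fun p => if q p.2 then some p.1 else none)
    = l.filter (fun e => q (f e)) := by
  induction l with
  | nil => rfl
  | cons x xs ih =>
    simp only [List.map_cons, List.zip_cons_cons, List.filterMap_cons, List.filter_cons]
    by_cases h : q (f x) <;> simp [h, ih]

-- membership in B's matched set decides the substring test for any word of any element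
theorem contains_matched (elements : List String) (tl : String) (w : String)
    (hw : w ∈ (elements.map (fun e => PySem.Str.split₀ (PySem.Str.lower e))).flatten) :
    PySem.Set.contains ((PySem.Set.ofList (elements.map (fun e => PySem.Str.split₀ (PySem.Str.lower e))).flatten).filter
        (fun w => PySem.Str.isIn w tl)) w
    = PySem.Str.isIn w tl := by
  have hmem : w ∈ PySem.Set.ofList (elements.map (fun e => PySem.Str.split₀ (PySem.Str.lower e))).flatten :=
    (PySem.Set.mem_ofList _ _).2 hw
  simp [PySem.Set.contains_eq_listContains, List.mem_filter, hmem]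

-- pointwise congruence for List.all
theorem all_congr' {α : Type} {l : List α} {p q : α → Bool} (h : ∀ x ∈ l, p x = q x) :
    l.all p = l.all q := by
  induction l with
  | nil => rfl
  | cons x xs ih =>
    simp [List.all_cons, h x (by simp), ih (fun y hy => h y (by simp [hy]))]

-- ===== VERDICT (by name: the statement is the Claim_ definition above) =====
theorem count_element_matches_py_spec : Claim_equal_count_element_matches_py := by
  intro elements text _
  show count_element_matches_py elements text = count_element_matches_py_alt elements text
  unfold count_element_matches_py count_element_matches_py_alt
  simp only []
  rw [a_fold_eq_filter,
    zip_filterMap_eq_filter elements (fun e => PySem.Str.split₀ (PySem.Str.lower e))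
      (fun ws => ws.all (fun w => PySem.Set.contains
        ((PySem.Set.ofList (elements.map (fun e => PySem.Str.split₀ (PySem.Str.lower e))).flatten).filter
          (fun w => PySem.Str.isIn w (PySem.Str.lower text))) w))]
  have hfil : elements.filter
      (fun e => (PySem.Str.split₀ (PySem.Str.lower e)).all (fun w => PySem.Str.isIn w (PySem.Str.lower text)))
    = elements.filter (fun e => (PySem.Str.split₀ (PySem.Str.lower e)).all (fun w =>
        PySem.Set.contains ((PySem.Set.ofList (elements.map (fun e => PySem.Str.split₀ (PySem.Str.lower e))).flatten).filter
          (fun w => PySem.Str.isIn w (PySem.Str.lower text))) w)) := by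
    apply List.filter_congr
    intro e he
    apply all_congr'
    intro w hw
    exact (contains_matched elements (PySem.Str.lower text) w
      (List.mem_flatten.2 ⟨_, List.mem_map_of_mem he, hw⟩)).symm
  rw [hfil]
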